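-- pv_equiv track=rewrite | github.com/ynotdoan/CSE015-UCMerced | Lab05/Lab05.py | is_a_graph
-- ===== SOURCE A (Python) =====
-- def is_a_graph (A, B, f):
--   # loop to run through elements
--   for element in f:
--     a = element[0]
--     for other in f:
--       if (other != element):
--         prime = other[0]
--         # checks if elements repeat
--         if (a == prime):
--           return False
--
--   return True
-- ===== SOURCE B (Python) =====
-- def is_a_graph(A, B, f):
--     pairs = set(f)
--     firsts = [p[0] for p in pairs]
--     return len(firsts) == len(set(firsts))
-- ===== Notes on version B (the rewrite author's own statement) =====
-- stated objective: idiomatic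
-- what changed: Replaces A's nested pairwise scan over f with a set-dedup of the pairs followed by a cardinality-uniqueness test on the first coordinates (len(firsts) == len(set(firsts))).
import Mathlib
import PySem

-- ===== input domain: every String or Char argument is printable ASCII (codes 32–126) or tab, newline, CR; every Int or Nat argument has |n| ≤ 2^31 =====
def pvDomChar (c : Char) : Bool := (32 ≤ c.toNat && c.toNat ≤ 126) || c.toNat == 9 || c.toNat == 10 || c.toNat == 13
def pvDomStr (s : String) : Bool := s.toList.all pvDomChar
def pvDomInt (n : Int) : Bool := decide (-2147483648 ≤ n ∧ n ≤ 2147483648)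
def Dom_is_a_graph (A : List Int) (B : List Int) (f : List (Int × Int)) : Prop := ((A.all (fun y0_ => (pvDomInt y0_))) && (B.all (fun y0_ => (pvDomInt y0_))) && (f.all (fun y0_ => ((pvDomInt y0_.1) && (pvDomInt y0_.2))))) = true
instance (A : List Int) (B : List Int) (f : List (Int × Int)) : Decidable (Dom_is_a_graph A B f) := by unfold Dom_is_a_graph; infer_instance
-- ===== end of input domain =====

-- B replaces A's quadratic nested pairwise scan by a set-dedup of the pairs plus a
-- cardinality test on the first coordinates (idiomatic; A and B agree everywhere).

-- ===== PORT A =====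
-- inner 'for other in f' loop: true as soon as some other != element has other[0] == element[0]
def pvInnerA (element : Int × Int) (g : List (Int × Int)) : Bool :=
  match g with
  | [] => false
  | other :: rest =>
    if other ≠ element then
      if other.1 = element.1 then true else pvInnerA element rest
    else pvInnerA element rest

-- outer 'for element in f' loop with the early 'return False'
def pvOuterA (f : List (Int × Int)) (rest : List (Int × Int)) : Bool :=
  match rest with
  | [] => true
  | e :: rs => if pvInnerA e f then false else pvOuterA f rs

def is_a_graph (A : List Int) (B : List Int) (f : List (Int × Int)) : Bool :=
  pvOuterA f f

-- ===== PORT B =====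
-- pairs = set(f); firsts = [p[0] for p in pairs]; len(firsts) == len(set(firsts))
-- (only lengths of the sets are used, so the result is independent of set iteration order)
def is_a_graph_alt (A : List Int) (B : List Int) (f : List (Int × Int)) : Bool :=
  let pairs : PySem.Set (Int × Int) := PySem.Set.ofList f
  let firsts : List Int := pairs.map Prod.fst
  firsts.length == (PySem.Set.ofList firsts).length

-- ===== PRECONDITION & SPEC =====
def Spec_is_a_graph (A : List Int) (B : List Int) (f : List (Int × Int)) (out : Bool) : Prop := out = is_a_graph_alt A B f
instance (A : List Int) (B : List Int) (f : List (Int × Int)) (out : Bool) : Decidable (Spec_is_a_graph A B f out) := by unfold Spec_is_a_graph; infer_instance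

-- ===== CLAIM (what is proved, stated in full; the proofs are below) =====
def Claim_equal_is_a_graph : Prop := ∀ (A : List Int) (B : List Int) (f : List (Int × Int)), Dom_is_a_graph A B f → Spec_is_a_graph A B f (is_a_graph A B f)

-- ===== LEMMAS AND PROOFS =====

theorem pvInnerA_eq_false_iff (e : Int × Int) (g : List (Int × Int)) :
    pvInnerA e g = false ↔ ∀ o ∈ g, o ≠ e → o.1 ≠ e.1 := by
  induction g with
  | nil => simp [pvInnerA]
  | cons o rest ih =>
    simp only [pvInnerA, List.mem_cons]
    split_ifs with hne hfst
    · exact iff_of_false id (fun h => h o (Or.inl rfl) hne hfst)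
    · rw [ih]
      constructor
      · rintro h p (rfl | hp) hpe
        · exact hfst
        · exact h p hp hpe
      · exact fun h p hp hpe => h p (Or.inr hp) hpe
    · rw [not_not] at hne
      subst hne
      rw [ih]
      constructor
      · rintro h p (rfl | hp) hpe
        · exact absurd rfl hpe
        · exact h p hp hpe
      · exact fun h p hp hpe => h p (Or.inr hp) hpe

theorem pvOuterA_eq_true_iff (f rest : List (Int × Int)) :
    pvOuterA f rest = true ↔ ∀ e ∈ rest, pvInnerA e f = false := by
  induction rest with
  | nil => simp [pvOuterA]
  | cons e rs ih =>
    by_cases h : pvInnerA e f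
    · simp [pvOuterA, h]
    · simp only [Bool.not_eq_true] at h
      simp [pvOuterA, h, ih]

theorem len_ofList_eq_iff {α : Type} [BEq α] [LawfulBEq α] (xs : List α) :
    (PySem.Set.ofList xs).length = xs.length ↔ xs.Nodup := by
  induction xs using List.reverseRecOn with
  | nil => simp [PySem.Set.ofList]
  | append_singleton s x ih =>
    have h1 : PySem.Set.ofList (s ++ [x]) = PySem.Set.add (PySem.Set.ofList s) x := by
      simp [PySem.Set.ofList, List.foldl_append]
    have hle := PySem.Set.length_ofList_le (xs := s)
    rw [h1]
    by_cases hx : x ∈ s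
    · rw [PySem.Set.add_of_mem (by simpa [PySem.Set.mem_ofList] using hx)]
      simp only [List.nodup_append, List.length_append, List.length_singleton]
      constructor
      · intro h; exact absurd h (by omega)
      · rintro ⟨-, -, hall⟩; exact False.elim (by simpa using hall x hx)
    · rw [PySem.Set.add_of_not_mem (by simpa [PySem.Set.mem_ofList] using hx)]
      simp only [List.nodup_append, List.length_append, List.length_singleton, List.nodup_cons]
      simp [← ih]
      intro _ a ha h
      exact hx (h ▸ ha)

theorem alt_eq_true_iff (A B : List Int) (f : List (Int × Int)) :
    is_a_graph_alt A B f = true ↔ ∀ a ∈ f, ∀ b ∈ f, a.1 = b.1 → a = b := by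
  unfold is_a_graph_alt
  simp only [beq_iff_eq]
  rw [eq_comm, len_ofList_eq_iff,
      List.nodup_map_iff_inj_on (PySem.Set.nodup_ofList (xs := f))]
  constructor
  · intro h a ha b hb hab
    exact h a (by simpa [PySem.Set.mem_ofList] using ha) b (by simpa [PySem.Set.mem_ofList] using hb) hab
  · intro h a ha b hb hab
    exact h a (by simpa [PySem.Set.mem_ofList] using ha) b (by simpa [PySem.Set.mem_ofList] using hb) hab

-- ===== VERDICT (by name: the statement is the Claim_ definition above) =====
theorem is_a_graph_spec : Claim_equal_is_a_graph := by
  intro A B f _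
  unfold Spec_is_a_graph
  rw [Bool.eq_iff_iff]
  unfold is_a_graph
  rw [pvOuterA_eq_true_iff, alt_eq_true_iff]
  constructor
  · intro h a ha b hb hab
    by_contra hne
    exact ((pvInnerA_eq_false_iff b f).mp (h b hb)) a ha hne hab
  · intro h e he
    rw [pvInnerA_eq_false_iff]
    intro o ho hne hfst
    exact hne (h o ho e he hfst)
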